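-- pv_equiv track=rewrite | github.com/Younghoda/programmers | 프로그래머스/unrated/120853. 컨트롤 제트/컨트롤 제트.py | solution
-- ===== SOURCE A (Python) =====
-- def solution(s):
--     answer = 0
--     s = s.split(" ")
--     for e, i in enumerate(s):
--         if i == "Z":
--             answer -= int(s[e-1])
--         else:
--             answer += int(i)
--
--     return answer
-- ===== SOURCE B (Python) =====
-- def solution(s):
--     stack = []
--     for t in s.split(" "):
--         if t == "Z":
--             if stack:
--                 stack.pop()
--         else:
--             stack.append(int(t))
--     return sum(stack)
-- ===== Notes on version B (the rewrite author's own statement) =====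
-- stated objective: alternative
-- what changed: Replaces A's running total with s[e-1] lookups by a stack: numbers are pushed, each 'Z' pops the most recent remaining number (nothing if the stack is empty), and the surviving stack is summed at the end.
-- intended difference: On inputs whose first token is the cancel marker and whose last token does not parse to zero, A's s[e-1] wraps to index -1 and subtracts the LAST token's value (witness "Z 1": A returns 0), while B treats a marker with no previous number as a no-op (B returns 1), which is the intended behaviour. — e.g. on solution("Z 1"): A returns 0, B returns 1
-- outside the precondition, e.g. on solution('Z'): A raises ValueError, B returns 0
import Mathlib
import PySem

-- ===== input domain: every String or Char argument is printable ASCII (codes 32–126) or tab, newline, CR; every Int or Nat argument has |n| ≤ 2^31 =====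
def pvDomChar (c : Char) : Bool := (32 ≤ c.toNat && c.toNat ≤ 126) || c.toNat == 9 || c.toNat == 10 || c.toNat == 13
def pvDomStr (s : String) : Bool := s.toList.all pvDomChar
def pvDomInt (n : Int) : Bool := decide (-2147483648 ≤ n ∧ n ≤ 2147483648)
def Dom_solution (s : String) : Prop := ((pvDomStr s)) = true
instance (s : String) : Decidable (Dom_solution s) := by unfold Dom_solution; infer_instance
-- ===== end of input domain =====

-- B keeps a stack of added numbers (Z pops the top; a leading Z with nothing to pop cancels nothing) and sums it at the end,
-- instead of A's running total with s[e-1] lookups; on a leading 'Z' A's s[e-1] wraps to the LAST token (D_ below), B cancels nothing.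


-- s.split(" ") with a nonempty separator never raises; split? is some there, so getD [] is exact.
def toksOf (s : String) : List String := (PySem.Str.split? s " ").getD []

-- ===== PORT A =====
def solution (s : String) : Int :=
  (PySem.List.enumerate (toksOf s) 0).foldl (fun answer ei =>
    if ei.2 == "Z" then
      answer - ((PySem.List.pyGet? (toksOf s) (ei.1 - 1)).bind PySem.Int.ofStr?).getD 0
    else
      answer + ((PySem.Int.ofStr? ei.2).getD 0)) 0

-- ===== PORT B =====
def solution_alt (s : String) : Int :=
  ((toksOf s).foldl (fun stack t =>
      if t == "Z" then (if stack.isEmpty then stack else stack.dropLast)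
      else stack ++ [(PySem.Int.ofStr? t).getD 0]) ([] : List Int)).sum

-- ===== PRECONDITION & SPEC =====
-- Pre_ excludes exactly the inputs where Python A raises ValueError: a non-'Z' token int() cannot
-- parse, or a 'Z' token whose predecessor (cyclically, as A's s[e-1] reads it) is not an int literal.
def Pre_solution (s : String) : Prop :=
  ∀ ei ∈ PySem.List.enumerate (toksOf s) 0,
    (if ei.2 = "Z"
     then ((PySem.List.pyGet? (toksOf s) (ei.1 - 1)).bind PySem.Int.ofStr?).isSome
     else (PySem.Int.ofStr? ei.2).isSome) = true
instance (s : String) : Decidable (Pre_solution s) := by unfold Pre_solution; infer_instance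

def pvWitness_solution : String := "1 2 Z 3"

-- On inputs whose first token is a marker (and the last token does not parse to zero), A's s[e-1]
-- wraps around to index -1 and subtracts the LAST token's value, while B treats a marker with no
-- previous number as a no-op, which is the intended behaviour.
def D_solution (s : String) : Prop :=
  (toksOf s).head? = some "Z" ∧
  ((toksOf s).getLast?.any (fun t => PySem.Int.ofStr? t != some 0)) = true
instance (s : String) : Decidable (D_solution s) := by unfold D_solution; infer_instance

def Spec_solution (s : String) (out : Int) : Prop := ¬ D_solution s → out = solution_alt s
instance (s : String) (out : Int) : Decidable (Spec_solution s out) := by unfold Spec_solution; infer_instance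

def pvDiffWitness_solution : String := "Z 1"
def pvDiffWitnessOut_solution : Int × Int := (0, 1)

-- ===== CLAIM (what is proved, stated in full; the proofs are below) =====
def Claim_unchanged_solution : Prop := ∀ (s : String), Dom_solution s → Pre_solution s → Spec_solution s (solution s)
def Claim_changed_solution : Prop := Dom_solution (pvDiffWitness_solution) ∧ Pre_solution (pvDiffWitness_solution) ∧ D_solution (pvDiffWitness_solution) ∧ solution (pvDiffWitness_solution) = pvDiffWitnessOut_solution.1 ∧ solution_alt (pvDiffWitness_solution) = pvDiffWitnessOut_solution.2 ∧ pvDiffWitnessOut_solution.1 ≠ pvDiffWitnessOut_solution.2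
def Claim_exact_solution : Prop := ∀ (s : String), Dom_solution s → Pre_solution s → D_solution s → solution s ≠ solution_alt s

-- ===== LEMMAS AND PROOFS =====

-- Under Pre_, no two consecutive 'Z' tokens: the second one's predecessor is "Z", which int() rejects.
theorem no_consec_Z (toks : List String)
    (hpre : ∀ ei ∈ PySem.List.enumerate toks 0,
      (if ei.2 = "Z"
       then ((PySem.List.pyGet? toks (ei.1 - 1)).bind PySem.Int.ofStr?).isSome
       else (PySem.Int.ofStr? ei.2).isSome) = true)
    (pre rest2 : List String) (h : toks = pre ++ "Z" :: "Z" :: rest2) : False := by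
  have hm : (((pre.length : Int) + 1), "Z") ∈ PySem.List.enumerate toks 0 := by
    subst h
    rw [PySem.List.enumerate_append, PySem.List.enumerate_cons, PySem.List.enumerate_cons]
    simp
  have := hpre _ hm
  rw [if_pos rfl] at this
  have hidx : ((pre.length : Int) + 1 - 1) = (pre.length : Int) := by ring
  rw [hidx, h, PySem.List.pyGet?_append_length] at this
  simp [show PySem.Int.ofStr? "Z" = none from rfl] at this

-- Invariant: A's running total equals the stack sum plus a fixed offset; whenever the next token is
-- 'Z', the stack's top is exactly the value A's s[e-1] lookup reads (or both are trivial: empty/0).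
theorem main_inv (toks : List String)
    (hpre : ∀ ei ∈ PySem.List.enumerate toks 0,
      (if ei.2 = "Z"
       then ((PySem.List.pyGet? toks (ei.1 - 1)).bind PySem.Int.ofStr?).isSome
       else (PySem.Int.ofStr? ei.2).isSome) = true) :
    ∀ (l pre : List String) (acc : Int) (stack : List Int),
      toks = pre ++ l →
      (∀ rest, l = "Z" :: rest →
        ((stack = [] ∧ ((PySem.List.pyGet? toks ((pre.length : Int) - 1)).bind PySem.Int.ofStr?).getD 0 = 0)
         ∨ (∃ st', stack = st' ++ [((PySem.List.pyGet? toks ((pre.length : Int) - 1)).bind PySem.Int.ofStr?).getD 0]))) →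
      (PySem.List.enumerate l (pre.length : Int)).foldl (fun answer ei =>
          if ei.2 == "Z" then
            answer - ((PySem.List.pyGet? toks (ei.1 - 1)).bind PySem.Int.ofStr?).getD 0
          else
            answer + ((PySem.Int.ofStr? ei.2).getD 0)) acc
        = (l.foldl (fun stack t =>
            if t == "Z" then (if stack.isEmpty then stack else stack.dropLast)
            else stack ++ [(PySem.Int.ofStr? t).getD 0]) stack).sum + (acc - stack.sum) := by
  intro l
  induction l with
  | nil =>
    intro pre acc stack _ _
    simp [PySem.List.enumerate_nil]
  | cons t rest ih =>
    intro pre acc stack hsplit hP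
    rw [PySem.List.enumerate_cons, List.foldl_cons, List.foldl_cons]
    have hsplit' : toks = (pre ++ [t]) ++ rest := by simp [hsplit]
    have hlen' : (((pre ++ [t]).length : Int)) = (pre.length : Int) + 1 := by simp
    by_cases hz : t = "Z"
    · subst hz
      have hPnext : ∀ rest2, rest = "Z" :: rest2 →
          (([] : List Int) = [] ∧ ((PySem.List.pyGet? toks (((pre ++ ["Z"]).length : Int) - 1)).bind PySem.Int.ofStr?).getD 0 = 0)
          ∨ (∃ st', ([] : List Int) = st' ++ [((PySem.List.pyGet? toks (((pre ++ ["Z"]).length : Int) - 1)).bind PySem.Int.ofStr?).getD 0]) := by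
        intro rest2 hr
        exact (no_consec_Z toks hpre pre rest2 (by rw [hsplit, hr])).elim
      have hPnext' : ∀ (st : List Int), ∀ rest2, rest = "Z" :: rest2 →
          ((st = [] ∧ ((PySem.List.pyGet? toks (((pre ++ ["Z"]).length : Int) - 1)).bind PySem.Int.ofStr?).getD 0 = 0)
          ∨ (∃ st', st = st' ++ [((PySem.List.pyGet? toks (((pre ++ ["Z"]).length : Int) - 1)).bind PySem.Int.ofStr?).getD 0])) := by
        intro st rest2 hr
        exact (no_consec_Z toks hpre pre rest2 (by rw [hsplit, hr])).elim
      simp only [beq_self_eq_true, if_true]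
      rcases hP rest rfl with ⟨hst, hv⟩ | ⟨st', hst⟩
      · subst hst
        simp only [List.isEmpty_nil]
        have h1 := ih (pre ++ ["Z"]) (acc - ((PySem.List.pyGet? toks ((pre.length : Int) - 1)).bind PySem.Int.ofStr?).getD 0) [] hsplit' (hPnext' [])
        rw [hlen'] at h1
        rw [h1, hv]
        simp
      · subst hst
        have hne : (st' ++ [((PySem.List.pyGet? toks ((pre.length : Int) - 1)).bind PySem.Int.ofStr?).getD 0]).isEmpty = false := by
          simp
        simp only [hne, Bool.false_eq_true, if_false, List.dropLast_concat]
        have h1 := ih (pre ++ ["Z"]) (acc - ((PySem.List.pyGet? toks ((pre.length : Int) - 1)).bind PySem.Int.ofStr?).getD 0) st' hsplit' (hPnext' st')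
        rw [hlen'] at h1
        rw [h1, List.sum_append, List.sum_cons, List.sum_nil]
        ring
    · have hz' : (t == "Z") = false := by simp [hz]
      simp only [hz', Bool.false_eq_true, if_false]
      have hPnext : ∀ rest2, rest = "Z" :: rest2 →
          ((stack ++ [(PySem.Int.ofStr? t).getD 0] = [] ∧ ((PySem.List.pyGet? toks (((pre ++ [t]).length : Int) - 1)).bind PySem.Int.ofStr?).getD 0 = 0)
          ∨ (∃ st', stack ++ [(PySem.Int.ofStr? t).getD 0] = st' ++ [((PySem.List.pyGet? toks (((pre ++ [t]).length : Int) - 1)).bind PySem.Int.ofStr?).getD 0])) := by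
        intro rest2 hr
        right
        refine ⟨stack, ?_⟩
        have hidx : (((pre ++ [t]).length : Int) - 1) = (pre.length : Int) := by
          rw [hlen']; ring
        rw [hidx, hsplit, PySem.List.pyGet?_append_length]
        simp
      have h1 := ih (pre ++ [t]) (acc + (PySem.Int.ofStr? t).getD 0) (stack ++ [(PySem.Int.ofStr? t).getD 0]) hsplit' hPnext
      rw [hlen'] at h1
      rw [h1, List.sum_append, List.sum_cons, List.sum_nil]
      ring

-- ===== VERDICT (by name: the statement is the Claim_ definition above) =====
theorem solution_spec : Claim_unchanged_solution := by
  intro s _ hpre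
  unfold Spec_solution
  intro hnd
  unfold Pre_solution at hpre
  unfold D_solution at hnd
  unfold solution solution_alt
  have h1 := main_inv (toksOf s) hpre (toksOf s) [] 0 [] (by simp) ?hP
  · rw [show ((([] : List String).length : Int)) = 0 by simp] at h1
    rw [h1]; simp
  case hP =>
    intro rest hr2
    left
    refine ⟨rfl, ?_⟩
    obtain ⟨t0, hl⟩ : ∃ t0, (toksOf s).getLast? = some t0 := by
      cases hl : (toksOf s).getLast? with
      | none => rw [List.getLast?_eq_none_iff] at hl; rw [hl] at hr2; simp at hr2
      | some t0 => exact ⟨t0, rfl⟩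
    have hz0 : PySem.Int.ofStr? t0 = some 0 := by
      by_contra hzz
      exact hnd ⟨by rw [hr2]; rfl, by rw [hl]; simpa using hzz⟩
    rw [show ((([] : List String).length : Int) - 1) = -1 by simp, PySem.List.pyGet?_neg_one, hl]
    simp [hz0]

theorem solution_changed : Claim_changed_solution := by unfold Claim_changed_solution; decide

theorem solution_tight : Claim_exact_solution := by
  intro s _ hpre hD
  unfold Pre_solution at hpre
  unfold D_solution at hD
  obtain ⟨hhd, hany⟩ := hD
  obtain ⟨rest, hr⟩ : ∃ rest, toksOf s = "Z" :: rest := by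
    cases h : toksOf s with
    | nil => rw [h] at hhd; simp at hhd
    | cons a l => rw [h] at hhd; simp at hhd; exact ⟨l, by rw [hhd]⟩
  rw [hr] at hpre hany
  obtain ⟨t0, hl⟩ : ∃ t0, ("Z" :: rest).getLast? = some t0 := by
    cases hl : ("Z" :: rest).getLast? with
    | none => rw [List.getLast?_eq_none_iff] at hl; simp at hl
    | some t0 => exact ⟨t0, rfl⟩
  have ht0 : PySem.Int.ofStr? t0 ≠ some 0 := by
    rw [hl] at hany; simpa using hany
  have hsome : (PySem.Int.ofStr? t0).isSome = true := by
    have hm : (((0 : Int), "Z")) ∈ PySem.List.enumerate ("Z" :: rest) 0 := by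
      rw [PySem.List.enumerate_cons]; exact List.mem_cons_self ..
    have hp := hpre _ hm
    rw [if_pos rfl] at hp
    rw [show (((0 : Int), "Z").1 - 1) = -1 by simp, PySem.List.pyGet?_neg_one, hl] at hp
    simpa using hp
  obtain ⟨v, hvv⟩ := Option.isSome_iff_exists.mp hsome
  have hvne : v ≠ 0 := fun h => ht0 (by rw [hvv, h])
  unfold solution solution_alt
  rw [hr, PySem.List.enumerate_cons, List.foldl_cons, List.foldl_cons]
  simp only [beq_self_eq_true, if_true, List.isEmpty_nil]
  have h1 := main_inv ("Z" :: rest) hpre rest ["Z"]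
      (0 - ((PySem.List.pyGet? ("Z" :: rest) ((0 : Int) - 1)).bind PySem.Int.ofStr?).getD 0) [] rfl ?hP
  · rw [show (((["Z"] : List String).length : Int)) = 0 + 1 by simp] at h1
    rw [h1]
    intro hcontra
    rw [show ((0 : Int) - 1) = (-1 : Int) by ring, PySem.List.pyGet?_neg_one, hl] at hcontra
    rw [Option.bind_some, hvv] at hcontra
    simp only [Option.getD_some, List.sum_nil] at hcontra
    exact hvne (by linarith [hcontra])
  case hP =>
    intro rest2 hr2
    exact (no_consec_Z ("Z" :: rest) hpre [] rest2 (by rw [hr2]; rfl)).elim
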